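-- pv_equiv track=rewrite | github.com/NoeGarcia2001/Lenguaje-Python | Criptografía Clásica.py | cifrar_monoalfabetico
-- ===== SOURCE A (Python) =====
-- def cifrar_monoalfabetico(texto, clave):
--     texto_cifrado = ''
--     i = 0
--     while i < len(texto):
--         if texto[i:i+2] == 'll':    # Comprobar si es "ll"
--             texto_cifrado += clave['ll']
--             i += 2  # Saltar los dos caracteres de "ll"
--         else:
--             texto_cifrado += clave.get(texto[i], texto[i])  # Cifrar cada letra según la clave
--             i += 1
--     return texto_cifrado
-- ===== SOURCE B (Python) =====
-- def cifrar_monoalfabetico(texto, clave):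
--     partes = texto.split('ll')
--     cifradas = [''.join(clave.get(c, c) for c in p) for p in partes]
--     return clave.get('ll', 'll').join(cifradas)
-- ===== Notes on version B (the rewrite author's own statement) =====
-- stated objective: faster
-- what changed: Replaces the manual index-by-index while-loop (explicit i+=2 digraph skipping, quadratic string += concatenation) by split-on-'ll' + per-segment character mapping + a single join with the cipher of 'll'.
import Mathlib
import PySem

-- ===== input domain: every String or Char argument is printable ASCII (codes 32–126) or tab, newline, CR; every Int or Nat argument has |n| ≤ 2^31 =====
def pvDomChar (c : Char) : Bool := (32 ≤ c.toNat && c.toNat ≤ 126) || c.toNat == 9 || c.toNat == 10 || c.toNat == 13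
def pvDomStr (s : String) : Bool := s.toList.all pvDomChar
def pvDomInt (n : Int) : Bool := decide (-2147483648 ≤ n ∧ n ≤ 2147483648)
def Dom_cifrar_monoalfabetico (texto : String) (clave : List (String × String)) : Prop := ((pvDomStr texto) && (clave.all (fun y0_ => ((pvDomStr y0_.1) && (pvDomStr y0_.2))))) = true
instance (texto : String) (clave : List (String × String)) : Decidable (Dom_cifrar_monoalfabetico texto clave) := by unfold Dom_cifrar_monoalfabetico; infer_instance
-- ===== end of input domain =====

-- B replaces A's index-by-index while-loop scanner by split-on-'ll' + per-segment char map + join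
-- (objective: simpler/idiomatic); where A raises KeyError ('ll' occurs in texto but clave has no
-- 'll' key, excluded by Pre_) B instead keeps 'll' unchanged.

-- ===== PORT A =====
-- A's while-loop over the index i, transliterated as structural recursion on the remaining
-- characters; the test 'texto[i:i+2] == "ll"' becomes the two-character pattern. clave['ll']
-- raises KeyError when get? = none (such inputs are excluded by Pre_; the port uses getD "" there).
def cifrarA_go (clave : List (String × String)) : List Char → List Char → List Char
  | acc, 'l' :: 'l' :: rest =>
      cifrarA_go clave (acc ++ (((PySem.Dict.mk clave).get? "ll").getD "").toList) rest
  | acc, c :: rest =>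
      cifrarA_go clave (acc ++ ((PySem.Dict.mk clave).getD (String.ofList [c]) (String.ofList [c])).toList) rest
  | acc, [] => acc

def cifrar_monoalfabetico (texto : String) (clave : List (String × String)) : String :=
  String.ofList (cifrarA_go clave [] texto.toList)

-- ===== PORT B =====
-- Source B: partes = texto.split('ll'); each segment's characters are looked up with clave.get(c, c)
-- and concatenated (''.join); the segments are joined with clave.get('ll', 'll').
def cifrar_monoalfabetico_alt (texto : String) (clave : List (String × String)) : String :=
  let partes := PySem.Chars.splitOn texto.toList ['l', 'l']
  let cifradas := partes.map (fun p =>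
    PySem.Chars.join [] (p.map (fun c =>
      ((PySem.Dict.mk clave).getD (String.ofList [c]) (String.ofList [c])).toList)))
  String.ofList (PySem.Chars.join ((PySem.Dict.mk clave).getD "ll" "ll").toList cifradas)

-- ===== PRECONDITION & SPEC =====
-- Pre_ excludes exactly the inputs where A raises KeyError: texto contains "ll" but clave has no "ll" key.
def Pre_cifrar_monoalfabetico (texto : String) (clave : List (String × String)) : Prop :=
  ['l', 'l'] <:+: texto.toList → ((PySem.Dict.mk clave).get? "ll").isSome = true
instance (texto : String) (clave : List (String × String)) : Decidable (Pre_cifrar_monoalfabetico texto clave) := by unfold Pre_cifrar_monoalfabetico; infer_instance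

def pvWitness_cifrar_monoalfabetico : String × (List (String × String)) :=
  ("llamada alla", [("ll", "X"), ("a", "4")])

def Spec_cifrar_monoalfabetico (texto : String) (clave : List (String × String)) (out : String) : Prop := out = cifrar_monoalfabetico_alt texto clave
instance (texto : String) (clave : List (String × String)) (out : String) : Decidable (Spec_cifrar_monoalfabetico texto clave out) := by unfold Spec_cifrar_monoalfabetico; infer_instance

-- ===== CLAIM (what is proved, stated in full; the proofs are below) =====
def Claim_equal_cifrar_monoalfabetico : Prop := ∀ (texto : String) (clave : List (String × String)), Dom_cifrar_monoalfabetico texto clave → Pre_cifrar_monoalfabetico texto clave → Spec_cifrar_monoalfabetico texto clave (cifrar_monoalfabetico texto clave)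


-- ===== LEMMAS AND PROOFS =====

-- B's split of the text on 'll', written as the same greedy left-to-right recursion A performs.
def splitLL : List Char → List (List Char)
  | 'l' :: 'l' :: rest => [] :: splitLL rest
  | c :: rest =>
      match splitLL rest with
      | p :: ps => (c :: p) :: ps
      | [] => [[c]]
  | [] => [[]]

theorem splitLL_ne_nil (l : List Char) : splitLL l ≠ [] := by
  rw [splitLL.eq_def]
  split
  · simp
  · split <;> simp
  · simp

theorem splitLL_cons (c : Char) (rest : List Char)
    (h : ¬ ∃ t, c :: rest = 'l' :: 'l' :: t) :
    splitLL (c :: rest) =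
      match splitLL rest with
      | p :: ps => (c :: p) :: ps
      | [] => [[c]] := by
  rw [splitLL.eq_def]
  split
  · rename_i rest' heq
    exact absurd ⟨rest', heq⟩ h
  · rename_i c' rest' _ heq
    cases heq
    rfl
  · simp at *

theorem splitOn_go_eq (fuel : Nat) : ∀ (l cur : List Char) (acc : List (List Char)),
    l.length < fuel →
    PySem.Chars.splitOn.go ['l', 'l'] fuel l cur acc =
      acc.reverse ++ (match splitLL l with
                      | p :: ps => (cur.reverse ++ p) :: ps
                      | [] => [cur.reverse]) := by
  induction fuel with
  | zero => intro l cur acc h; omega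
  | succ f ih =>
    intro l cur acc h
    cases l with
    | nil => simp [PySem.Chars.splitOn.go, splitLL]
    | cons c rest =>
      by_cases hp : ∃ t, c :: rest = 'l' :: 'l' :: t
      · obtain ⟨t, ht⟩ := hp
        cases ht
        have hpre : List.isPrefixOf ['l', 'l'] ('l' :: 'l' :: t) = true := by
          simp [List.isPrefixOf]
        rw [PySem.Chars.splitOn.go]
        simp only [hpre, if_true]
        have hdrop : List.drop (['l', 'l'] : List Char).length ('l' :: 'l' :: t) = t := rfl
        rw [hdrop, ih t [] (cur.reverse :: acc) (by simp at h ⊢; omega)]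
        have hne := splitLL_ne_nil t
        cases hsp : splitLL t with
        | nil => exact absurd hsp hne
        | cons p ps =>
          simp [splitLL, hsp]
      · have hpre : List.isPrefixOf ['l', 'l'] (c :: rest) = false := by
          cases rest with
          | nil => simp [List.isPrefixOf]
          | cons d t =>
            simp [List.isPrefixOf]
            intro h1 h2
            exact hp ⟨t, by rw [← h1, ← h2]⟩
        rw [PySem.Chars.splitOn.go]
        simp only [hpre, if_false, Bool.false_eq_true]
        rw [ih rest (c :: cur) acc (by simp at h ⊢; omega)]
        rw [splitLL_cons c rest hp]
        have hne := splitLL_ne_nil rest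
        cases hsp : splitLL rest with
        | nil => exact absurd hsp hne
        | cons p ps => simp

theorem splitOn_eq_splitLL (l : List Char) :
    PySem.Chars.splitOn l ['l', 'l'] = splitLL l := by
  rw [PySem.Chars.splitOn, splitOn_go_eq (l.length + 1) l [] [] (by omega)]
  have hne := splitLL_ne_nil l
  cases hsp : splitLL l with
  | nil => exact absurd hsp hne
  | cons p ps => simp

-- joining a list whose head carries an extra prefix
theorem join_head_append (sep a b : List Char) (t : List (List Char)) :
    PySem.Chars.join sep ((a ++ b) :: t) = a ++ PySem.Chars.join sep (b :: t) := by
  cases t with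
  | nil => simp [PySem.Chars.join, List.intercalate]
  | cons x xs => simp [PySem.Chars.join, List.intercalate, List.append_assoc]

theorem join_nil_cons (x : List Char) (xs : List (List Char)) :
    PySem.Chars.join [] (x :: xs) = x ++ PySem.Chars.join [] xs := by
  cases xs with
  | nil => simp [PySem.Chars.join_singleton, PySem.Chars.join_nil]
  | cons y t => simp [PySem.Chars.join_cons_cons]

theorem cifrarA_go_spec (clave : List (String × String)) :
    ∀ (n : Nat) (l acc : List Char), l.length ≤ n →
    (['l', 'l'] <:+: l → ((PySem.Dict.mk clave).get? "ll").isSome = true) →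
    cifrarA_go clave acc l =
      acc ++ PySem.Chars.join ((PySem.Dict.mk clave).getD "ll" "ll").toList
        ((splitLL l).map (fun p =>
          PySem.Chars.join [] (p.map (fun c =>
            ((PySem.Dict.mk clave).getD (String.ofList [c]) (String.ofList [c])).toList)))) := by
  intro n
  induction n with
  | zero =>
    intro l acc hlen _
    have : l = [] := List.eq_nil_of_length_eq_zero (Nat.le_zero.mp hlen)
    subst this
    simp [cifrarA_go, splitLL, PySem.Chars.join, List.intercalate]
  | succ m ih =>
    intro l acc hlen hkey
    cases l with
    | nil => simp [cifrarA_go, splitLL, PySem.Chars.join, List.intercalate]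
    | cons c rest =>
      by_cases hp : ∃ t, c :: rest = 'l' :: 'l' :: t
      · obtain ⟨t, ht⟩ := hp
        cases ht
        have hsome : ((PySem.Dict.mk clave).get? "ll").isSome = true :=
          hkey ⟨[], t, rfl⟩
        obtain ⟨w, hw⟩ := Option.isSome_iff_exists.mp hsome
        have hkey' : ['l', 'l'] <:+: t → ((PySem.Dict.mk clave).get? "ll").isSome = true :=
          fun _ => hsome
        rw [show cifrarA_go clave acc ('l' :: 'l' :: t) =
              cifrarA_go clave (acc ++ (((PySem.Dict.mk clave).get? "ll").getD "").toList) t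
            from rfl]
        rw [ih t _ (by simp at hlen ⊢; omega) hkey']
        have hsepv : ((PySem.Dict.mk clave).getD "ll" "ll") = w := by
          rw [PySem.Dict.getD_eq_get?_getD, hw]; rfl
        have hne := splitLL_ne_nil t
        cases hsp : splitLL t with
        | nil => exact absurd hsp hne
        | cons p ps =>
          rw [show splitLL ('l' :: 'l' :: t) = [] :: splitLL t from rfl, hsp]
          simp only [List.map_cons]
          rw [show PySem.Chars.join [] (List.map (fun c =>
                ((PySem.Dict.mk clave).getD (String.ofList [c]) (String.ofList [c])).toList) ([] : List Char)) = ([] : List Char)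
              from rfl]
          rw [PySem.Chars.join_cons_cons]
          rw [hsepv, hw]
          simp [List.append_assoc]
      · have hkey' : ['l', 'l'] <:+: rest → ((PySem.Dict.mk clave).get? "ll").isSome = true := by
          intro hinf
          obtain ⟨s, t, hst⟩ := hinf
          exact hkey ⟨c :: s, t, by rw [← hst]; rfl⟩
        have hgo : cifrarA_go clave acc (c :: rest) =
            cifrarA_go clave (acc ++ ((PySem.Dict.mk clave).getD (String.ofList [c]) (String.ofList [c])).toList) rest := by
          rw [cifrarA_go.eq_def]
          split
          · rename_i rest' heq
            exact absurd ⟨rest', heq⟩ hp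
          · rename_i c' rest' _ heq
            cases heq
            rfl
          · simp at *
        rw [hgo, ih rest _ (by simp at hlen ⊢; omega) hkey']
        rw [splitLL_cons c rest hp]
        have hne := splitLL_ne_nil rest
        cases hsp : splitLL rest with
        | nil => exact absurd hsp hne
        | cons p ps =>
          simp only [List.map_cons]
          rw [join_nil_cons, join_head_append]
          simp [List.append_assoc]

-- ===== VERDICT (by name: the statement is the Claim_ definition above) =====
theorem cifrar_monoalfabetico_spec : Claim_equal_cifrar_monoalfabetico := by
  intro texto clave _ hpre
  unfold Spec_cifrar_monoalfabetico cifrar_monoalfabetico cifrar_monoalfabetico_alt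
  rw [cifrarA_go_spec clave texto.toList.length texto.toList [] (Nat.le_refl _) hpre,
      splitOn_eq_splitLL]
  simp
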